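-- pv_equiv track=rewrite | github.com/AmeliaWinters/Kryptos | Kryptos.py | simple_k3
-- ===== SOURCE A (Python) =====
-- def simple_k3(ciphertext, n):
--     decrypted_text = []
--     total = n * len(ciphertext)
--     i = 0
--     while(i < total):
--         if(i % n == 0):
--             decrypted_text.append(ciphertext[i % len(ciphertext)])
--         i += 1
--     return ''.join(decrypted_text)
-- ===== SOURCE B (Python) =====
-- def simple_k3(ciphertext, n):
--     L = len(ciphertext)
--     if n <= 0 or L == 0:
--         return ''
--     step = n % L
--     out = []
--     j = 0
--     for _ in range(L):
--         out.append(ciphertext[j])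
--         j += step
--         if j >= L:
--             j -= L
--     return ''.join(out)
-- ===== Notes on version B (the rewrite author's own statement) =====
-- stated objective: faster
-- what changed: Instead of scanning all n*len indices and testing i % n == 0, B keeps a cursor that starts at 0 and advances by n % len each step with one conditional subtraction as wraparound, emitting one character per step for len steps.
import Mathlib
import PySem

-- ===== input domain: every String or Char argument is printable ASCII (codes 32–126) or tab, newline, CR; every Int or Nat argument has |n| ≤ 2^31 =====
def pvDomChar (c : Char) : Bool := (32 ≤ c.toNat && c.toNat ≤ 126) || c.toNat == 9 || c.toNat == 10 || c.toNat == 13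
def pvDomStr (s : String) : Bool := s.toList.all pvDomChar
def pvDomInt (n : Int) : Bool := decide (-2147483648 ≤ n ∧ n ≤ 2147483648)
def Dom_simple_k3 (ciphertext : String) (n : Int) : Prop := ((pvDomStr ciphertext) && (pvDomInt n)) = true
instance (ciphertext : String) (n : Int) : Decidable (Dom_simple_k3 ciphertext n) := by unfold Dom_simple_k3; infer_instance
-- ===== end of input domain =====

-- B replaces A's scan of all n*len indices (keeping those i with i % n == 0) by a cursor
-- that advances by n % len per emitted character with a conditional-subtraction wraparound;
-- one pass of len steps, same return value on every input.

-- ===== PORT A =====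
-- literal port of A: while i < n*len, append ciphertext[i % len] whenever i % n == 0
def simple_k3 (ciphertext : String) (n : Int) : String :=
  let cs := ciphertext.toList
  let total : Int := n * (cs.length : Int)
  String.ofList ((PySem.List.pyRange 0 total 1).foldl
    (fun acc i =>
      if PySem.Int.mod i n = 0 then
        acc ++ [PySem.List.pyGetD cs (PySem.Int.mod i (cs.length : Int)) ' ']
      else acc) [])

-- ===== PORT B =====
-- literal port of B's loop: emit ciphertext[j], then j += step, wrapping by one subtraction
def simpleK3Walk (cs : List Char) (L step : Int) : Nat → Int → List Char → List Char
  | 0, _, out => out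
  | m + 1, j, out =>
      simpleK3Walk cs L step m
        (if L ≤ j + step then j + step - L else j + step)
        (out ++ [PySem.List.pyGetD cs j ' '])

-- literal port of B: bail out on n <= 0 or empty text, else walk the cursor len times
def simple_k3_alt (ciphertext : String) (n : Int) : String :=
  let cs := ciphertext.toList
  let L : Int := (cs.length : Int)
  if n ≤ 0 ∨ L = 0 then ""
  else
    let step := PySem.Int.mod n L
    String.ofList (simpleK3Walk cs L step cs.length 0 [])

-- ===== PRECONDITION & SPEC =====
def Spec_simple_k3 (ciphertext : String) (n : Int) (out : String) : Prop := out = simple_k3_alt ciphertext n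
instance (ciphertext : String) (n : Int) (out : String) : Decidable (Spec_simple_k3 ciphertext n out) := by unfold Spec_simple_k3; infer_instance

-- ===== CLAIM (what is proved, stated in full; the proofs are below) =====
def Claim_equal_simple_k3 : Prop := ∀ (ciphertext : String) (n : Int), Dom_simple_k3 ciphertext n → Spec_simple_k3 ciphertext n (simple_k3 ciphertext n)

-- ===== LEMMAS AND PROOFS =====

-- in a block [a, a+n) starting at a multiple of n, the only multiple of n is a itself
lemma filter_block (n a : Int) (hn : 0 < n) (ha : n ∣ a) :
    (PySem.List.pyRange a (a + n) 1).filter (fun i => decide (PySem.Int.mod i n = 0)) = [a] := by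
  rw [PySem.List.pyRange_one_cons (by omega)]
  simp only [List.filter_cons]
  rw [decide_eq_true (by rw [PySem.Int.mod_eq_zero_iff_dvd]; exact ha)]
  have : (PySem.List.pyRange (a + 1) (a + n) 1).filter (fun i => decide (PySem.Int.mod i n = 0)) = [] := by
    apply List.filter_eq_nil_iff.mpr
    intro x hx
    rw [PySem.List.mem_pyRange_one] at hx
    simp only [decide_eq_true_eq]
    rw [PySem.Int.mod_eq_zero_iff_dvd]
    intro hdvd
    obtain ⟨c, hc⟩ := ha
    obtain ⟨d, hd⟩ := hdvd
    subst hc hd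
    have h1 : c < d := by nlinarith
    have h2 : d < c + 1 := by nlinarith
    omega
  rw [this]
  simp

-- the multiples of n in [0, n*L) are exactly k*n for k in [0, L)
lemma filter_range_mul (n : Int) (hn : 0 < n) (L : Nat) :
    (PySem.List.pyRange 0 (n * L) 1).filter (fun i => decide (PySem.Int.mod i n = 0))
      = (PySem.List.pyRange 0 L 1).map (fun k => k * n) := by
  induction L with
  | zero => simp [PySem.List.pyRange_one_eq_nil]
  | succ m ih =>
    have hsplit : PySem.List.pyRange 0 (n * (m + 1 : Nat)) 1
        = PySem.List.pyRange 0 (n * m) 1 ++ PySem.List.pyRange (n * m) (n * m + n) 1 := by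
      have : (n * ((m : Int) + 1)) = n * m + n := by ring
      rw [show ((m + 1 : Nat) : Int) = (m : Int) + 1 by push_cast; ring, this]
      exact PySem.List.pyRange_one_append 0 (n * m) (n * m + n) (by positivity) (by omega)
    rw [hsplit, List.filter_append, ih, filter_block n (n * m) hn ⟨m, rfl⟩]
    rw [show ((m + 1 : Nat) : Int) = (m : Int) + 1 by push_cast; ring,
        PySem.List.pyRange_one_succ_right (by positivity), List.map_append]
    simp [mul_comm]

-- the cursor walk emits ciphertext[(j + t*step) % L] at its t-th step
lemma walk_eq (cs : List Char) (L step : Int) (_hL : 0 < L) (hs0 : 0 ≤ step) (hsL : step < L) :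
    ∀ (m : Nat) (j : Int) (out : List Char), 0 ≤ j → j < L →
      simpleK3Walk cs L step m j out
        = out ++ (List.range m).map
            (fun (t : Nat) => PySem.List.pyGetD cs ((j + (t : Int) * step) % L) ' ') := by
  intro m
  induction m with
  | zero => intro j out _ _; simp [simpleK3Walk]
  | succ m ih =>
    intro j out hj0 hjL
    have hj' : (if L ≤ j + step then j + step - L else j + step) % L = (j + step) % L := by
      split_ifs with h
      · exact Int.sub_emod_right (j + step) L
      · rfl
    rw [simpleK3Walk, ih _ _ (by split_ifs <;> omega) (by split_ifs <;> omega),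
        List.range_succ_eq_map, List.map_cons, List.map_map, List.append_assoc]
    congr 1
    rw [List.singleton_append]
    congr 1
    · simp [Int.emod_eq_of_lt hj0 hjL]
    · apply List.map_congr_left
      intro t _
      simp only [Function.comp_apply, Nat.succ_eq_add_one]
      congr 1
      have hmod : ((if L ≤ j + step then j + step - L else j + step) + (t : Int) * step) % L
          = ((j + step) + (t : Int) * step) % L := Int.ModEq.add_right _ hj'
      rw [hmod]
      push_cast
      ring_nf

theorem simple_k3_spec_aux (ciphertext : String) (n : Int) :
    simple_k3 ciphertext n = simple_k3_alt ciphertext n := by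
  unfold simple_k3 simple_k3_alt
  simp only []
  set cs := ciphertext.toList with hcs
  by_cases h : n ≤ 0 ∨ (cs.length : Int) = 0
  · rw [if_pos h]
    have htot : n * (cs.length : Int) ≤ 0 := by
      rcases h with h | h
      · exact mul_nonpos_of_nonpos_of_nonneg h (by positivity)
      · rw [h]; simp
    rw [PySem.List.pyRange_one_eq_nil htot]
    rfl
  · rw [if_neg h]
    push Not at h
    obtain ⟨hn, hL⟩ := h
    have hn' : 0 < n := by omega
    have hL' : 0 < (cs.length : Int) := lt_of_le_of_ne (by positivity) (Ne.symm hL)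
    -- A side: reduce the filtered scan to a map over k in [0, len)
    rw [PySem.List.foldl_append_ite (fun i => PySem.Int.mod i n = 0)
          (fun i => PySem.List.pyGetD cs (PySem.Int.mod i (cs.length : Int)) ' '),
        filter_range_mul n hn' cs.length, List.map_map, List.nil_append]
    -- B side: reduce the cursor walk to the same map
    have hstep0 : 0 ≤ PySem.Int.mod n (cs.length : Int) := by
      rw [PySem.Int.mod_eq_emod_of_pos hL']; exact Int.emod_nonneg n (by omega)
    have hstepL : PySem.Int.mod n (cs.length : Int) < (cs.length : Int) := by
      rw [PySem.Int.mod_eq_emod_of_pos hL']; exact Int.emod_lt_of_pos n hL'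
    rw [walk_eq cs _ _ hL' hstep0 hstepL cs.length 0 [] le_rfl hL', List.nil_append]
    rw [PySem.List.pyRange_one, List.map_map]
    congr 1
    apply List.map_congr_left
    intro t _
    simp only [Function.comp, zero_add]
    congr 1
    rw [PySem.Int.mod_eq_emod_of_pos hL', PySem.Int.mod_eq_emod_of_pos hL']
    rw [Int.mul_emod]
    conv_rhs => rw [Int.mul_emod, Int.emod_emod_of_dvd _ dvd_rfl]

-- ===== VERDICT (by name: the statement is the Claim_ definition above) =====
theorem simple_k3_spec : Claim_equal_simple_k3 := by
  intro ciphertext n _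
  exact simple_k3_spec_aux ciphertext n
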